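-- pv_equiv track=rewrite | github.com/changhyun-dev1/Study | 4월/코딩테스트/4주차/solution.py | solution
-- ===== SOURCE A (Python) =====
-- def solution(word):
--     answer = 0
--     dic = ['A', 'E', 'I', 'O', 'U']
--     li = [5**i for i in range(len(dic))]
--
--     for i in range(len(word)-1,-1,-1):
--         idx = dic.index(word[i])
--         for j in range(5-i):
--             answer += li[j]*idx
--         answer+=1
--     return answer
-- ===== SOURCE B (Python) =====
-- def solution(word):
--     # rank = len(word) + sum_i idx_i * weight_i, weight table precomputed
--     weights = [781, 156, 31, 6, 1]
--     answer = len(word)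
--     for i, ch in enumerate(word):
--         idx = "AEIOU".index(ch)
--         if i < 5:
--             answer += weights[i] * idx
--     return answer
-- ===== Notes on version B (the rewrite author's own statement) =====
-- stated objective: simpler
-- what changed: A's backward outer loop with a nested inner loop re-summing powers of 5 is replaced by a single forward pass that adds idx * weight from a precomputed weight table [781,156,31,6,1], with the +1 per character folded into len(word).
import Mathlib
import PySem

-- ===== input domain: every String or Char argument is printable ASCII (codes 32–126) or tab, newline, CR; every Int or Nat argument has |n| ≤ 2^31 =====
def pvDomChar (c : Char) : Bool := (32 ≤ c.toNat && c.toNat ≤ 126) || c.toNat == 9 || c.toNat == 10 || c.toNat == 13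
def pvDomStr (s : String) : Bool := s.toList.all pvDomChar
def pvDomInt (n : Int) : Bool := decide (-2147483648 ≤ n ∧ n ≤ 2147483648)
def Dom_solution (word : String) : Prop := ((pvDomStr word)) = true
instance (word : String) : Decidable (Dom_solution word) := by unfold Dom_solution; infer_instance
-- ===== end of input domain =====

-- B replaces A's backward outer loop + nested power-resumming inner loop by one forward
-- pass with a precomputed weight table (objective: simpler).

-- ===== PORT A =====
-- literal port of A: answer = 0; dic; li = [5**i]; backward index loop with an inner
-- range(5-i) loop.  dic.index(word[i]) raises ValueError on a non-vowel: the port takes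
-- getD defaults there, excluded by Pre_solution.
def solution (word : String) : Int :=
  let answer : Int := 0
  let dic : List Char := ['A', 'E', 'I', 'O', 'U']
  let li : List Int := (List.range dic.length).map (fun i => (5 : Int) ^ i)
  (PySem.List.pyRange (PySem.Str.len word - 1) (-1) (-1)).foldl
    (fun answer i =>
      let idx : Int :=
        (((PySem.List.index? dic ((PySem.Str.pyGet? word i).getD ' ')).getD 0 : Nat) : Int)
      let answer := (PySem.List.pyRange 0 (5 - i) 1).foldl
        (fun answer j => answer + PySem.List.pyGetD li j 0 * idx) answer
      answer + 1)
    answer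

-- ===== PORT B =====
-- literal port of Source B: weight table, answer = len(word), one forward enumerate pass.
def solution_alt (word : String) : Int :=
  let weights : List Int := [781, 156, 31, 6, 1]
  (PySem.List.enumerate word.toList).foldl
    (fun answer p =>
      let idx : Int :=
        (((PySem.List.index? "AEIOU".toList p.2).getD 0 : Nat) : Int)
      if p.1 < 5 then answer + PySem.List.pyGetD weights p.1 0 * idx else answer)
    (PySem.Str.len word)

-- ===== PRECONDITION & SPEC =====
-- Pre_ excludes exactly the words containing a non-vowel character, on which the Python
-- 'index' lookup raises ValueError (in both A and B).
def Pre_solution (word : String) : Prop :=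
  (word.toList.all (fun c => c ∈ (['A', 'E', 'I', 'O', 'U'] : List Char))) = true
instance (word : String) : Decidable (Pre_solution word) := by
  unfold Pre_solution; infer_instance

def pvWitness_solution : String := "UAEIOUA"

def Spec_solution (word : String) (out : Int) : Prop := out = solution_alt word
instance (word : String) (out : Int) : Decidable (Spec_solution word out) := by
  unfold Spec_solution; infer_instance

-- ===== CLAIM (what is proved, stated in full; the proofs are below) =====
def Claim_equal_solution : Prop :=
  ∀ (word : String), Dom_solution word → Pre_solution word → Spec_solution word (solution word)

-- ===== LEMMAS AND PROOFS =====

-- the index of a character in the vowel list, as both ports compute it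
def pvIdx (c : Char) : Int :=
  (((PySem.List.index? (['A', 'E', 'I', 'O', 'U'] : List Char) c).getD 0 : Nat) : Int)

-- A's inner loop total equals B's table weight (0 once i ≥ 5)
lemma weight_sum (i : Int) (h0 : 0 ≤ i) :
    ((PySem.List.pyRange 0 (5 - i) 1).map
        (fun j => PySem.List.pyGetD ((List.range 5).map (fun k => (5 : Int) ^ k)) j 0)).sum
      = (if i < 5 then PySem.List.pyGetD ([781, 156, 31, 6, 1] : List Int) i 0 else 0) := by
  rcases lt_or_ge i 5 with h5 | h5
  · interval_cases i <;> decide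
  · rw [if_neg (not_lt.mpr h5), PySem.List.pyRange_one_eq_nil (by omega)]
    simp

-- A as a sum over the forward index range
lemma solution_eq_sum (word : String) :
    solution word =
      ((PySem.List.pyRange 0 (word.toList.length : Int) 1).map
        (fun i =>
          ((PySem.List.pyRange 0 (5 - i) 1).map
              (fun j => PySem.List.pyGetD ((List.range 5).map (fun k => (5 : Int) ^ k)) j 0)).sum
            * pvIdx ((PySem.List.pyGet? word.toList i).getD ' ') + 1)).sum := by
  unfold solution
  dsimp only
  rw [PySem.List.foldl_congr_mem _ _
        (fun answer i =>
          answer +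
            (((PySem.List.pyRange 0 (5 - i) 1).map
                (fun j => PySem.List.pyGetD ((List.range 5).map (fun k => (5 : Int) ^ k)) j 0)).sum
              * pvIdx ((PySem.List.pyGet? word.toList i).getD ' ') + 1)) _
        (by
          intro acc i _
          dsimp only
          rw [PySem.List.foldl_add, List.sum_map_mul_right]
          simp only [pvIdx, List.length_cons, List.length_nil, PySem.Str.pyGet?_eq]
          rw [show PySem.Chars.pyGet? word.toList i = PySem.List.pyGet? word.toList i from rfl]
          ring)]
  rw [PySem.List.foldl_add]
  rw [PySem.Str.len_eq]
  have : PySem.List.pyRange ((word.toList.length : Int) - 1) (-1) (-1)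
      = (PySem.List.pyRange 0 (word.toList.length : Int) 1).reverse := by
    rw [PySem.List.pyRange_neg_one_eq_reverse]
    norm_num
  rw [this, List.map_reverse, List.sum_reverse, zero_add]

-- B as len + a sum over the same range
lemma solution_alt_eq_sum (word : String) :
    solution_alt word =
      (word.toList.length : Int) +
      ((PySem.List.pyRange 0 (word.toList.length : Int) 1).map
        (fun i =>
          if i < 5 then
            PySem.List.pyGetD ([781, 156, 31, 6, 1] : List Int) i 0
              * pvIdx ((PySem.List.pyGet? word.toList i).getD ' ')
          else 0)).sum := by
  unfold solution_alt
  dsimp only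
  rw [PySem.List.enumerate_eq_map_pyRange word.toList ' ', List.foldl_map]
  rw [PySem.List.foldl_congr_mem _ _
        (fun answer i =>
          answer +
            (if i < 5 then
              PySem.List.pyGetD ([781, 156, 31, 6, 1] : List Int) i 0
                * pvIdx ((PySem.List.pyGet? word.toList i).getD ' ')
            else 0)) _
        (by
          intro acc i _
          dsimp only
          have hd : PySem.List.pyGetD word.toList i ' '
              = (PySem.List.pyGet? word.toList i).getD ' ' := by
            simp [PySem.List.pyGetD]
          have hA : "AEIOU".toList = (['A', 'E', 'I', 'O', 'U'] : List Char) := by decide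
          split_ifs with h
          · rw [hd, hA]; rfl
          · simp)]
  rw [PySem.List.foldl_add, PySem.Str.len_eq, PySem.List.len_eq]

-- ===== VERDICT (by name: the statement is the Claim_ definition above) =====
theorem solution_spec : Claim_equal_solution := by
  intro word _ _
  show solution word = solution_alt word
  rw [solution_eq_sum, solution_alt_eq_sum]
  rw [List.map_congr_left (g := fun i =>
        (if i < 5 then
          PySem.List.pyGetD ([781, 156, 31, 6, 1] : List Int) i 0
            * pvIdx ((PySem.List.pyGet? word.toList i).getD ' ')
        else 0) + 1)
      (by
        intro i hi
        have h0 : 0 ≤ i := (PySem.List.mem_pyRange_one.mp hi).1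
        dsimp only
        rw [weight_sum i h0]
        split_ifs with h
        · ring
        · ring)]
  rw [PySem.List.sum_map_add_int, PySem.List.sum_map_const_int,
      PySem.List.length_pyRange_one]
  simp [Int.toNat_natCast]
  ring
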